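-- pv_equiv track=rewrite | github.com/jomujin/Skill-Check | PROGRAMMERS_SKILLCHECK/SC_level2/SC_level2_17683.py | solution
-- ===== SOURCE A (Python) =====
-- def solution(m, musicinfos):
--     answer = []
--     # m 변환 (#A -> a)
--     mm = list(_ for _ in m)
--     for l in range(len(mm)):
--         if l < len(mm) and mm[l] == '#':
--             mm[l-1] = mm[l-1].lower()
--             mm.pop(l)
--     m = ''.join(mm)
--
--     # musicinfor 리스트 정리 4개씩
--     music_info = []
--     for i in musicinfos:
--         music_info.append(i.split(','))
--
--     for idx, info in enumerate(music_info):
--         for i in range(len(info)):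
--             # 시간 숫자로 변환
--             if i <= 1:
--                 a, b = info[i].split(':')
--                 info[i] = int(a) * 60 + int(b)
--             # m 과 동일하게 변환(#A -> a)
--             if i == 3:
--                 time = info[1] - info[0]
--                 new = list(_ for _ in info[i])
--                 for j in range(len(new)):
--                     if j < len(new) and new[j] == '#':
--                         new[j-1] = new[j-1].lower()
--                         new.pop(j)
--
--                 # 음악 길이 조정
--                 time_x = time // len(new)
--                 time_y = time % len(new)
--                 if time >= len(new):
--                     new  = ''.join(new * time_x + new[:time_y])
--                 else:
--                     new = ''.join(new[:time])
--
--                 if m in new: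
--                     answer.append([idx, time, info[2]])
--
--     # answer 안에 저장된 값이 있을 경우
--     # 재생된 시간이 가장 긴거 + 먼저 들어온 순서로 정렬 필요
--     if answer:
--         answer = sorted(answer, key= lambda x: (-x[1], x[0]))
--         return answer[0][2]
--     else:
--         return '(None)'
-- ===== SOURCE B (Python) =====
-- def _normalize(s):
--     # 'C#' -> 'c': a '#' lowercases the note just written, everything else is kept
--     out = []
--     for ch in s:
--         if ch == '#':
--             if out:
--                 out[-1] = out[-1].lower()
--         else:
--             out.append(ch)
--     return ''.join(out)
--
--
-- def _minutes(field):
--     h, mn = field.split(':')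
--     return int(h) * 60 + int(mn)
--
--
-- def solution(m, musicinfos):
--     key = _normalize(m)
--     best = None  # (duration, genre); strict '>' keeps the earliest entry on ties
--     for info in musicinfos:
--         parts = info.split(',')
--         times = [_minutes(f) for f in parts[:2]]
--         if len(parts) < 4:
--             continue
--         time = times[1] - times[0]
--         mel = _normalize(parts[3])
--         if time >= len(mel):
--             played = mel * (time // len(mel)) + mel[:time % len(mel)]
--         else:
--             played = mel[:time]
--         if key in played and (best is None or time > best[0]):
--             best = (time, parts[2])
--     return '(None)' if best is None else best[1]
-- ===== Notes on version B (the rewrite author's own statement) =====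
-- stated objective: simpler
-- what changed: The '#'-normalization becomes a single left-to-right scan (a '#' lowercases the note just written) instead of A's index loop that mutates and pops from the list it iterates over, each entry is parsed directly instead of re-writing ints into the split list, and the answer is a running best kept with strict '>' instead of collecting all matches and sorting by (-time, index); Pre_ excludes the malformed melodies ('#' with no note before it: a leading '#' or '##') on which A's pop-during-iteration loop wraps to index -1 or leaves a stray '#' behind.
-- outside the precondition, e.g. on solution('c', ['00:00,00:01,pop,#C']): A returns 'pop', B returns '(None)'; on solution('#B', ['00:00,00:01,pop,B']): A returns '(None)', B returns 'pop'; on solution('yy', ['00:00,00:03,pop,Y##']): A returns '(None)', B returns 'pop'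
import Mathlib
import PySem

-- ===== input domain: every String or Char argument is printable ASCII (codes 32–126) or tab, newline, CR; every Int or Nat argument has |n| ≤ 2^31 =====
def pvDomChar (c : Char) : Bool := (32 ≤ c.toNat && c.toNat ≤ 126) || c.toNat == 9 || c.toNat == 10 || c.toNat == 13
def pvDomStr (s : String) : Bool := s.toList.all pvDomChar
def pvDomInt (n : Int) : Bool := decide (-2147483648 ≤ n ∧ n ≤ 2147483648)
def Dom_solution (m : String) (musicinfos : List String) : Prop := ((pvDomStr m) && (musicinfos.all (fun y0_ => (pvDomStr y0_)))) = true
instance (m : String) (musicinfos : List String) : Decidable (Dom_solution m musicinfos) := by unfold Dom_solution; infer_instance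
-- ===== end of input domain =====

-- B replaces A's index-popping normalization loop by a single left-to-right scan and A's
-- collect-then-sort ranking by a running best kept with strict '>' (objective: simpler).

-- shared primitive: Python's  s * n  on strings (n ≤ 0 gives ''), exact
def pvStrMul (cs : List Char) (n : Int) : List Char :=
  (List.range n.toNat).foldl (fun acc _ => acc ++ cs) []

-- shared primitive: Python's  s.split(',')  (separator is non-empty, so split? never returns none)
def pvParts (s : String) : List String := (PySem.Str.split? s ",").getD []

-- ===== PORT A =====
-- one iteration of A's  'for l in range(len(mm)): if l < len(mm) and mm[l] == "#": mm[l-1] = mm[l-1].lower(); mm.pop(l)'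
def pvA_normStep (mm : List Char) (l : Int) : List Char :=
  if l < PySem.List.len mm ∧ PySem.List.pyGet? mm l = some '#' then
    let mm1 := PySem.List.pySetD mm (l - 1) (PySem.Chars.lowerChar (PySem.List.pyGetD mm (l - 1) ' '))
    match PySem.List.pop? mm1 l with
    | some r => r.2
    | none => mm1        -- unreachable: the guard puts l in range
  else mm

def pvA_norm (cs : List Char) : List Char :=
  (PySem.List.pyRange 0 (PySem.List.len cs) 1).foldl pvA_normStep cs

-- a, b = f.split(':'); int(a) * 60 + int(b)   (none = ValueError)
def pvA_parse? (f : String) : Option Int :=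
  match PySem.Str.split? f ":" with
  | some [a, b] => do
      let x ← PySem.Int.ofStr? a
      let y ← PySem.Int.ofStr? b
      pure (x * 60 + y)
  | _ => none

-- A stores ints back into the same list (info[i] = int(a)*60+int(b)): model the cell as Int ⊕ String
def pvIValInt : Int ⊕ String → Int
  | .inl n => n
  | .inr _ => 0            -- default never read: cells 0,1 hold ints when they are read
def pvIValStr : Int ⊕ String → String
  | .inl _ => ""           -- default never read: cells 2,3 stay strings
  | .inr s => s

-- one iteration of A's inner 'for i in range(len(info))' (none = a raised exception)
def pvA_innerStep (key : List Char) (idx : Int)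
    (st : Option (List (Int ⊕ String) × List (Int × Int × String))) (i : Int) :
    Option (List (Int ⊕ String) × List (Int × Int × String)) :=
  match st with
  | none => none
  | some (info, ans) =>
    if i ≤ 1 then
      match pvA_parse? (pvIValStr (PySem.List.pyGetD info i (.inr ""))) with
      | some t => some (PySem.List.pySetD info i (.inl t), ans)
      | none => none
    else if i = 3 then
      let time := pvIValInt (PySem.List.pyGetD info 1 (.inl 0)) - pvIValInt (PySem.List.pyGetD info 0 (.inl 0))
      let new0 := pvA_norm (pvIValStr (PySem.List.pyGetD info 3 (.inr ""))).toList
      if new0.length = 0 then none     -- ZeroDivisionError at time // len(new)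
      else
        let timex := PySem.Int.floordiv time (PySem.List.len new0)
        let timey := PySem.Int.mod time (PySem.List.len new0)
        let new1 := if PySem.List.len new0 ≤ time then
            pvStrMul new0 timex ++ PySem.List.slice new0 none (some timey)
          else PySem.List.slice new0 none (some time)
        if PySem.Chars.isIn key new1 then
          some (info, ans ++ [(idx, time, pvIValStr (PySem.List.pyGetD info 2 (.inr "")))])
        else some (info, ans)
    else some (info, ans)

-- one iteration of A's  'for idx, info in enumerate(music_info)'
def pvA_entry (key : List Char) (st : Option (List (Int × Int × String))) (p : Int × List String) :
    Option (List (Int × Int × String)) :=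
  match st with
  | none => none
  | some ans =>
    let info0 : List (Int ⊕ String) := p.2.map .inr
    match (PySem.List.pyRange 0 (PySem.List.len info0) 1).foldl (pvA_innerStep key p.1) (some (info0, ans)) with
    | some r => some r.2
    | none => none

def solution (m : String) (musicinfos : List String) : String :=
  let key := pvA_norm m.toList
  let musicInfo := musicinfos.map pvParts
  match (PySem.List.enumerate musicInfo 0).foldl (pvA_entry key) (some []) with
  | none => ""             -- a Python exception: excluded by Pre_solution
  | some ans =>
    if ans.isEmpty then "(None)"
    else
      match PySem.List.sorted2 ans (fun x => -x.2.1) (fun x => x.1) with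
      | x :: _ => x.2.2
      | [] => "(None)"     -- unreachable: sorted of a non-empty list

-- ===== PORT B =====
-- B's _normalize: one scan; a '#' lowercases the note just written, everything else is kept
def pvB_normStep (out : List Char) (c : Char) : List Char :=
  if c = '#' then
    if out.isEmpty then out
    else PySem.List.pySetD out (-1) (PySem.Chars.lowerChar (PySem.List.pyGetD out (-1) ' '))
  else out ++ [c]

def pvB_norm (cs : List Char) : List Char := cs.foldl pvB_normStep []

-- B's _minutes (none = ValueError)
def pvB_minutes? (f : String) : Option Int :=
  match PySem.Str.split? f ":" with
  | some [h, mn] => do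
      let x ← PySem.Int.ofStr? h
      let y ← PySem.Int.ofStr? mn
      pure (x * 60 + y)
  | _ => none

-- B's [_minutes(f) for f in parts[:2]] (none = ValueError)
def pvB_times? : List String → Option (List Int)
  | [] => some []
  | f :: rest =>
    match pvB_minutes? f, pvB_times? rest with
    | some t, some ts => some (t :: ts)
    | _, _ => none

-- one iteration of B's loop; state: none = a raised exception, some best
def pvB_entryStep (key : List Char) (st : Option (Option (Int × String))) (s : String) :
    Option (Option (Int × String)) :=
  match st with
  | none => none
  | some best =>
    let parts := pvParts s
    match pvB_times? (parts.take 2) with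
    | none => none
    | some ts =>
      if parts.length < 4 then some best
      else
        let time := ts.getD 1 0 - ts.getD 0 0
        let mel := pvB_norm (parts.getD 3 "").toList
        let played? : Option (List Char) :=
          if PySem.List.len mel ≤ time then
            if mel.length = 0 then none   -- ZeroDivisionError
            else some (pvStrMul mel (PySem.Int.floordiv time (PySem.List.len mel)) ++
                       PySem.List.slice mel none (some (PySem.Int.mod time (PySem.List.len mel))))
          else some (PySem.List.slice mel none (some time))
        match played? with
        | none => none
        | some played =>
          if PySem.Chars.isIn key played &&
             (best.isNone || decide ((best.getD (0, "")).1 < time)) then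
            some (some (time, parts.getD 2 ""))
          else some best
def solution_alt (m : String) (musicinfos : List String) : String :=
  let key := pvB_norm m.toList
  match musicinfos.foldl (pvB_entryStep key) (some none) with
  | none => ""             -- a Python exception: excluded by Pre_solution
  | some none => "(None)"
  | some (some b) => b.2

-- ===== PRECONDITION & SPEC =====
-- an HH:MM field A can convert: exactly two ':'-separated pieces, both int()-parseable
def pvTimeOkB (f : String) : Bool :=
  match PySem.Str.split? f ":" with
  | some [a, b] => (PySem.Int.ofStr? a).isSome && (PySem.Int.ofStr? b).isSome
  | _ => false

def pvInfoOkB (s : String) : Bool :=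
  let p := pvParts s
  ((p.take 2).all pvTimeOkB) &&
  (decide (p.length < 4) || (!(decide (p.getD 3 "" = "")) && !(decide (p.getD 3 "" = "#"))))

-- a melody string on which A's '#'-loop wraps to index -1 AND the wrap changes a character
def pvDmB (cs : List Char) : Bool :=
  cs.head?.any (· == '#') && decide (2 ≤ cs.length) && cs.getLast?.any PySem.Chars.isupper

-- a melody string containing '##'
def pvDH : List Char → Bool
  | [] => false
  | [_] => false
  | a :: b :: rest => (a == '#' && b == '#') || pvDH (b :: rest)

-- a malformed melody: a '#' with no note before it (at the start, or right after another '#')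
def pvBadMel (cs : List Char) : Bool :=
  (pvDmB cs || pvDH cs)

-- Pre_ = the inputs on which A returns normally (every existing field 0/1 of each entry
-- parses as HH:MM, else ValueError, and a 4-field entry's melody is neither "" nor "#",
-- else ZeroDivisionError), minus the malformed melodies stated below.
-- Pre_ excludes inputs whose query m or whose 4-field entry's melody has a '#' with no
-- note before it (a leading '#' ending in an uppercase letter, or a '##'): a '#' modifies
-- the note before it, and there A's pop-during-iteration loop wraps to index -1 or leaves
-- a stray '#' behind — artefacts of A's implementation; B's scan treats such a '#' as
-- modifying the note written so far, if any.
def Pre_solution (m : String) (musicinfos : List String) : Prop :=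
  (musicinfos.all pvInfoOkB &&
   !(pvBadMel m.toList ||
     musicinfos.any (fun s =>
       decide (4 ≤ (pvParts s).length) && pvBadMel ((pvParts s).getD 3 "").toList))) = true
instance (m : String) (musicinfos : List String) : Decidable (Pre_solution m musicinfos) := by
  unfold Pre_solution; infer_instance

def pvWitness_solution : String × List String :=
  ("C#DE", ["12:00,12:14,classic,C#DEFGAB", "13:00,13:05,pop,ABCDEF"])

def Spec_solution (m : String) (musicinfos : List String) (out : String) : Prop :=
  out = solution_alt m musicinfos
instance (m : String) (musicinfos : List String) (out : String) : Decidable (Spec_solution m musicinfos out) := by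
  unfold Spec_solution; infer_instance

-- ===== CLAIM =====
def Claim_equal_solution : Prop := ∀ (m : String) (musicinfos : List String),
  Dom_solution m musicinfos → Pre_solution m musicinfos → Spec_solution m musicinfos (solution m musicinfos)

-- ===== LEMMAS AND PROOFS =====

lemma pvDH_tail (c : Char) (r : List Char) (h : pvDH (c :: r) = false) : pvDH r = false := by
  cases r with
  | nil => rfl
  | cons d r' =>
    simp only [pvDH, Bool.or_eq_false_iff] at h
    exact h.2

lemma pvDH_head (d : Char) (r : List Char) (h : pvDH ('#' :: d :: r) = false) : d ≠ '#' := by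
  intro hd; subst hd; simp [pvDH] at h

lemma pv_lower_of_not_upper {c : Char} (h : PySem.Chars.isupper c = false) :
    PySem.Chars.lowerChar c = c := by
  simp [PySem.Chars.lowerChar, h]

lemma pv_eraseIdx_append (l r : List Char) (x : Char) : (l ++ x :: r).eraseIdx l.length = l ++ r := by
  induction l with
  | nil => simp
  | cons a t ih => simp [List.eraseIdx_cons_succ, ih]

lemma pv_set_append (l r : List Char) (x v : Char) (h : l ≠ []) :
    (l ++ x :: r).set (l.length - 1) v = l.set (l.length - 1) v ++ x :: r := by
  rw [List.set_append_left]
  exact Nat.sub_lt (List.length_pos_of_ne_nil h) one_pos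

lemma pvA_step_hash (out rest : List Char) (hout : out ≠ []) :
    pvA_normStep (out ++ '#' :: rest) out.length =
      (out.set (out.length - 1) (PySem.Chars.lowerChar (out.getLast hout))) ++ rest := by
  have hpos := List.length_pos_of_ne_nil hout
  have hget : PySem.List.pyGet? (out ++ '#' :: rest) out.length = some '#' :=
    PySem.List.pyGet?_append_length out rest '#'
  have hguard : (out.length : Int) < PySem.List.len (out ++ '#' :: rest) ∧
      PySem.List.pyGet? (out ++ '#' :: rest) out.length = some '#' := by
    refine ⟨?_, hget⟩
    simp only [PySem.List.len_eq, List.length_append, List.length_cons]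
    push_cast; omega
  simp only [pvA_normStep]
  rw [if_pos hguard]
  have hidx : (out.length : Int) - 1 = ((out.length - 1 : Nat) : Int) := by push_cast; omega
  have hgd : PySem.List.pyGetD (out ++ '#' :: rest) ((out.length : Int) - 1) ' ' =
      out.getLast hout := by
    rw [hidx, PySem.List.pyGetD_natCast, List.getD_eq_getElem?_getD,
      List.getElem?_append_left (by omega), List.getElem?_eq_getElem (by omega),
      Option.getD_some, List.getLast_eq_getElem]
  rw [hgd]
  have hset : PySem.List.pySetD (out ++ '#' :: rest) ((out.length : Int) - 1)
      (PySem.Chars.lowerChar (out.getLast hout)) =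
      out.set (out.length - 1) (PySem.Chars.lowerChar (out.getLast hout)) ++ '#' :: rest := by
    rw [hidx, PySem.List.pySetD_natCast, pv_set_append _ _ _ _ hout]
  rw [hset]
  set out' := out.set (out.length - 1) (PySem.Chars.lowerChar (out.getLast hout)) with hout'
  have hl : out'.length = out.length := by simp [hout']
  have hlen' : out.length < (out' ++ '#' :: rest).length := by
    simp only [List.length_append, List.length_cons]; omega
  rw [PySem.List.pop?_natCast _ _ hlen']
  have herase : (out' ++ '#' :: rest).eraseIdx out.length = out' ++ rest := by
    rw [← hl, pv_eraseIdx_append]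
  simp [herase]

lemma pvA_step_skip (out rest : List Char) (c : Char) (hc : c ≠ '#') :
    pvA_normStep (out ++ c :: rest) out.length = out ++ c :: rest := by
  have hget : PySem.List.pyGet? (out ++ c :: rest) out.length = some c :=
    PySem.List.pyGet?_append_length out rest c
  simp only [pvA_normStep]
  rw [if_neg]
  rintro ⟨-, h2⟩
  rw [hget] at h2
  exact hc (by simpa using h2)

lemma pv_pySetD_neg_one (xs : List Char) (v : Char) (h : xs ≠ []) :
    PySem.List.pySetD xs (-1) v = xs.set (xs.length - 1) v := by
  have hpos := List.length_pos_of_ne_nil h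
  simp only [PySem.List.pySetD, PySem.List.pySet?, PySem.List.pyIdx?]
  rw [if_neg (by omega), if_pos (by push_cast; omega)]
  simp

lemma pvB_step_hash (out : List Char) (hout : out ≠ []) :
    pvB_normStep out '#' =
      out.set (out.length - 1) (PySem.Chars.lowerChar (out.getLast hout)) := by
  simp only [pvB_normStep, reduceIte]
  rw [if_neg (by simpa using hout),
    PySem.List.pyGetD_neg_one out ' ' hout, pv_pySetD_neg_one _ _ hout]

lemma pvB_step_keep (out : List Char) (c : Char) (hc : c ≠ '#') :
    pvB_normStep out c = out ++ [c] := by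
  simp [pvB_normStep, hc]

lemma pvA_stuck (n : Int) : ∀ (fuel : Nat) (a : Int) (mm : List Char),
    (n - a).toNat ≤ fuel → (mm.length : Int) ≤ a →
    (PySem.List.pyRange a n 1).foldl pvA_normStep mm = mm := by
  intro fuel
  induction fuel with
  | zero =>
    intro a mm hf hlen
    rw [PySem.List.pyRange_one_eq_nil (by omega)]
    rfl
  | succ k ih =>
    intro a mm hf hlen
    by_cases hab : n ≤ a
    · rw [PySem.List.pyRange_one_eq_nil hab]; rfl
    · rw [PySem.List.pyRange_one_cons (by omega)]
      have hstep : pvA_normStep mm a = mm := by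
        simp only [pvA_normStep, PySem.List.len_eq]
        rw [if_neg]; rintro ⟨h1, -⟩; omega
      rw [List.foldl_cons, hstep]
      exact ih (a + 1) mm (by omega) (by omega)

lemma pvA_eq_scan (n : Int) : ∀ (fuel : Nat) (rest out : List Char),
    rest.length ≤ fuel → out ≠ [] → (out.length : Int) + rest.length ≤ n → pvDH rest = false →
    (PySem.List.pyRange (out.length) n 1).foldl pvA_normStep (out ++ rest) =
      rest.foldl pvB_normStep out := by
  intro fuel
  induction fuel with
  | zero =>
    intro rest out hf hne hb hdh
    have : rest = [] := List.eq_nil_of_length_eq_zero (by omega)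
    subst this
    simp only [List.append_nil, List.foldl_nil]
    exact pvA_stuck n (n - out.length).toNat out.length out (by simp) (by simp)
  | succ k ih =>
    intro rest out hf hne hb hdh
    cases rest with
    | nil =>
      simp only [List.append_nil, List.foldl_nil]
      exact pvA_stuck n (n - out.length).toNat out.length out (by simp) (by simp)
    | cons c rest' =>
      have hlt : (out.length : Int) < n := by
        have : (rest'.length : Int) ≥ 0 := by positivity
        simp only [List.length_cons] at hb; push_cast at hb; omega
      rw [PySem.List.pyRange_one_cons hlt, List.foldl_cons]
      by_cases hc : c = '#'
      · subst hc
        rw [pvA_step_hash out rest' hne]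
        set out' := out.set (out.length - 1) (PySem.Chars.lowerChar (out.getLast hne)) with hout'
        have hl : out'.length = out.length := by simp [hout']
        rw [List.foldl_cons, pvB_step_hash out hne, ← hout']
        cases rest' with
        | nil =>
          simp only [List.foldl_nil]
          rw [List.append_nil]
          exact pvA_stuck n (n - (out.length + 1)).toNat (out.length + 1) out'
            (by simp) (by rw [hl]; omega)
        | cons d rest'' =>
          have hd : d ≠ '#' := pvDH_head d rest'' hdh
          rw [List.foldl_cons, pvB_step_keep out' d hd]
          have hre : out' ++ d :: rest'' = (out' ++ [d]) ++ rest'' := by simp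
          have hlen2 : ((out' ++ [d]).length : Int) = (out.length : Int) + 1 := by
            simp [hl]
          have := ih rest'' (out' ++ [d]) (by simp at hf; omega) (by simp)
            (by rw [hlen2]; simp only [List.length_cons] at hb ⊢; push_cast at hb ⊢; omega)
            (pvDH_tail _ _ (pvDH_tail _ _ hdh))
          rw [hre, ← this, hlen2]
      · rw [pvA_step_skip out rest' c hc]
        rw [List.foldl_cons, pvB_step_keep out c hc]
        have hre : out ++ c :: rest' = (out ++ [c]) ++ rest' := by simp
        have hlen2 : ((out ++ [c]).length : Int) = (out.length : Int) + 1 := by simp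
        have := ih rest' (out ++ [c]) (by simp at hf; omega) (by simp)
          (by rw [hlen2]; simp only [List.length_cons] at hb ⊢; push_cast at hb ⊢; omega)
          (pvDH_tail _ _ hdh)
        rw [hre, ← this, hlen2]

lemma pv_norm_eq (cs : List Char) (h : pvBadMel cs = false) : pvA_norm cs = pvB_norm cs := by
  have hdm : pvDmB cs = false := by
    rcases Bool.or_eq_false_iff.mp h with ⟨h1, _⟩; exact h1
  have hdh : pvDH cs = false := by
    rcases Bool.or_eq_false_iff.mp h with ⟨_, h2⟩; exact h2
  cases cs with
  | nil => decide
  | cons c t =>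
    have hn : PySem.List.len (c :: t) = ((t.length + 1 : Nat) : Int) := by
      simp [PySem.List.len_eq]
    by_cases hc : c = '#'
    · subst hc
      cases t with
      | nil => decide
      | cons d ts =>
        -- pvDmB is false, head is '#' and length ≥ 2, so the last char is not uppercase
        have hup : PySem.Chars.isupper (('#' :: d :: ts).getLast (by simp)) = false := by
          simp only [pvDmB, Bool.and_eq_false_iff] at hdm
          rcases hdm with (h | h) | h
          · simp at h
          · simp at h
          · rw [List.getLast?_eq_some_getLast (h := by simp)] at h
            simpa using h
        have hd : d ≠ '#' := pvDH_head d ts hdh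
        -- first iteration: the wraparound lowering is the identity, '#' is popped
        have hstep0 : pvA_normStep ('#' :: d :: ts) 0 = d :: ts := by
          simp only [pvA_normStep]
          rw [if_pos ⟨by simp [PySem.List.len_eq]; positivity, by simp [PySem.List.pyGet?_zero_cons]⟩]
          rw [show (0 : Int) - 1 = -1 by omega]
          rw [PySem.List.pyGetD_neg_one _ ' ' (by simp), pv_pySetD_neg_one _ _ (by simp)]
          rw [pv_lower_of_not_upper hup, List.getLast_eq_getElem, List.set_getElem_self]
          rw [show ((0:Int)) = ((0:Nat):Int) by rfl, PySem.List.pop?_natCast _ _ (by simp)]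
          simp
        unfold pvA_norm pvB_norm
        rw [PySem.List.pyRange_one_cons (by rw [hn]; exact_mod_cast Nat.zero_lt_succ _), List.foldl_cons, hstep0]
        have hmain := pvA_eq_scan (PySem.List.len ('#' :: d :: ts)) ts.length ts [d] le_rfl
          (by simp) (by simp only [PySem.List.len_eq, List.length_cons, List.length_singleton, List.length_nil]; push_cast; omega)
          (pvDH_tail _ _ (pvDH_tail _ _ hdh))
        norm_num at hmain ⊢
        rw [hmain]
        have s1 : pvB_normStep [] '#' = [] := by simp [pvB_normStep]
        have s2 : pvB_normStep [] d = [d] := pvB_step_keep [] d hd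
        rw [s1, s2]
    · -- first char is not '#': the first iteration keeps it, then the scans coincide
      unfold pvA_norm pvB_norm
      rw [PySem.List.pyRange_one_cons (by rw [hn]; exact_mod_cast Nat.zero_lt_succ _), List.foldl_cons]
      have h0 : pvA_normStep (c :: t) ((0 : Int)) = c :: t := by
        have := pvA_step_skip [] t c hc; simpa using this
      rw [h0]
      have hmain := pvA_eq_scan (PySem.List.len (c :: t)) t.length t [c] le_rfl
        (by simp) (by simp only [PySem.List.len_eq, List.length_cons, List.length_singleton, List.length_nil]; push_cast; omega)
        (pvDH_tail _ _ hdh)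
      norm_num at hmain ⊢
      rw [hmain]
      have s1 : pvB_normStep [] c = [c] := pvB_step_keep [] c hc
      rw [s1]

lemma pvB_scan_len_mono : ∀ (cs : List Char) (out : List Char),
    out.length ≤ (cs.foldl pvB_normStep out).length := by
  intro cs
  induction cs with
  | nil => intro out; simp
  | cons c cs ih =>
    intro out
    rw [List.foldl_cons]
    have hstep : out.length ≤ (pvB_normStep out c).length := by
      simp only [pvB_normStep]
      split_ifs with h1 h2
      · simp
      · simp [PySem.List.length_pySetD]
      · simp
    exact le_trans hstep (ih (pvB_normStep out c))

lemma pvB_norm_ne_nil (cs : List Char) (h1 : cs ≠ []) (h2 : cs ≠ ['#'])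
    (h3 : pvDH cs = false) : pvB_norm cs ≠ [] := by
  unfold pvB_norm
  cases cs with
  | nil => exact absurd rfl h1
  | cons c t =>
    by_cases hc : c = '#'
    · subst hc
      cases t with
      | nil => exact absurd rfl h2
      | cons d ts =>
        have hd : d ≠ '#' := pvDH_head d ts h3
        rw [List.foldl_cons, show pvB_normStep [] '#' = [] from by simp [pvB_normStep]]
        rw [List.foldl_cons, pvB_step_keep [] d hd]
        simp only [List.nil_append]
        have := pvB_scan_len_mono ts [d]
        intro hnil
        rw [hnil] at this
        simp at this
    · rw [List.foldl_cons, pvB_step_keep [] c hc]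
      simp only [List.nil_append]
      have := pvB_scan_len_mono t [c]
      intro hnil
      rw [hnil] at this
      simp at this

-- ===== the ranking: head of sorted(ans, key=(-t, idx)) = running best with strict '>' =====

def pvBefore (x y : Int × Int × String) : Bool :=
  decide ((-x.2.1 : Int) < -y.2.1) || (!decide ((-y.2.1 : Int) < -x.2.1) && decide (x.1 < y.1))

def pvMinStep (h : Option (Int × Int × String)) (x : Int × Int × String) : Option (Int × Int × String) :=
  some (match h with
        | none => x
        | some y => if pvBefore x y then x else y)

def pvUpd (b : Option (Int × String)) (x : Int × Int × String) : Option (Int × String) :=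
  if b.isNone || decide ((b.getD (0, "")).1 < x.2.1) then some (x.2.1, x.2.2) else b

lemma pv_insertBy_head (x : Int × Int × String) (acc : List (Int × Int × String)) :
    (PySem.List.insertBy pvBefore x acc).head? =
      some (match acc.head? with
            | none => x
            | some y => if pvBefore x y then x else y) := by
  cases acc with
  | nil => simp [PySem.List.insertBy]
  | cons y ys =>
    simp only [PySem.List.insertBy]
    split_ifs with h <;> simp [h]

lemma pv_foldl_insertBy_head : ∀ (l : List (Int × Int × String)) (acc : List (Int × Int × String)),
    (l.foldl (fun acc x => PySem.List.insertBy pvBefore x acc) acc).head? = l.foldl pvMinStep acc.head? := by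
  intro l
  induction l with
  | nil => intro acc; rfl
  | cons x xs ih =>
    intro acc
    rw [List.foldl_cons, List.foldl_cons, ih, pv_insertBy_head]
    rfl

lemma pv_sorted2_head (l : List (Int × Int × String)) :
    (PySem.List.sorted2 l (fun x => -x.2.1) (fun x => x.1)).head? = l.foldl pvMinStep none := by
  have : PySem.List.sorted2 l (fun x => -x.2.1) (fun x => x.1) =
      l.foldl (fun acc x => PySem.List.insertBy pvBefore x acc) [] := by
    simp only [PySem.List.sorted2]
    rfl
  rw [this, pv_foldl_insertBy_head]
  rfl

lemma pv_minfold_mem : ∀ (l : List (Int × Int × String)) (h0 : Option (Int × Int × String)) (h : Int × Int × String),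
    l.foldl pvMinStep h0 = some h → h ∈ l ∨ h0 = some h := by
  intro l
  induction l with
  | nil => intro h0 h he; exact Or.inr he
  | cons x xs ih =>
    intro h0 h he
    rw [List.foldl_cons] at he
    rcases ih _ _ he with hm | he2
    · exact Or.inl (List.mem_cons_of_mem _ hm)
    · simp only [pvMinStep] at he2
      cases h0 with
      | none => simp at he2; exact Or.inl (by simp [he2])
      | some y =>
        simp only at he2
        split_ifs at he2 with hb
        · exact Or.inl (by simp at he2; simp [he2])
        · exact Or.inr (by simp at he2; simp [he2])

lemma pv_minfold_vs_best (l : List (Int × Int × String))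
    (hp : l.Pairwise (fun a b => a.1 < b.1)) :
    (l.foldl pvMinStep none).map (fun x => (x.2.1, x.2.2)) = l.foldl pvUpd none := by
  induction l using List.reverseRecOn with
  | nil => rfl
  | append_singleton xs x ih =>
    have hp' : xs.Pairwise (fun a b => a.1 < b.1) := (List.pairwise_append.mp hp).1
    have hlt : ∀ y ∈ xs, y.1 < x.1 := by
      intro y hy
      exact (List.pairwise_append.mp hp).2.2 y hy x (by simp)
    rw [List.foldl_append, List.foldl_append, List.foldl_cons, List.foldl_cons,
      List.foldl_nil, List.foldl_nil, ← ih hp']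
    cases hfold : xs.foldl pvMinStep none with
    | none => rfl
    | some h =>
      have hmem : h ∈ xs := by
        rcases pv_minfold_mem xs none h hfold with hm | habs
        · exact hm
        · exact absurd habs (by simp)
      have hidx : h.1 < x.1 := hlt h hmem
      have hbe : pvBefore x h = decide (h.2.1 < x.2.1) := by
        have hx : decide (x.1 < h.1) = false := by simp; omega
        simp only [pvBefore, hx, Bool.and_false, Bool.or_false, decide_eq_decide]
        omega
      simp only [pvMinStep, pvUpd, hbe, Option.map_some, Option.isNone_some,
        Option.getD_some, Bool.false_or]
      by_cases hc : h.2.1 < x.2.1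
      · simp [hc]
      · simp [hc]

-- ===== per-entry and whole-list equivalence =====

-- the conceptual per-entry result (proof-level only): duration and genre when the entry matches
def pvMatch? (key : List Char) (s : String) : Option (Int × String) :=
  let p := pvParts s
  if 4 ≤ p.length then
    let time := (pvB_minutes? (p.getD 1 "")).getD 0 - (pvB_minutes? (p.getD 0 "")).getD 0
    let mel := pvB_norm (p.getD 3 "").toList
    let played := if PySem.List.len mel ≤ time then
        pvStrMul mel (PySem.Int.floordiv time (PySem.List.len mel)) ++
        PySem.List.slice mel none (some (PySem.Int.mod time (PySem.List.len mel)))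
      else PySem.List.slice mel none (some time)
    if PySem.Chars.isIn key played then some (time, p.getD 2 "") else none
  else none

def pvMatches (key : List Char) (idx : Int) : List String → List (Int × Int × String)
  | [] => []
  | s :: rest => ((pvMatch? key s).map (fun r => (idx, r.1, r.2))).toList ++ pvMatches key (idx + 1) rest

def pvEntryOk (s : String) : Prop :=
  pvInfoOkB s = true ∧
  (decide (4 ≤ (pvParts s).length) && pvBadMel (((pvParts s).getD 3 "")).toList) = false

-- a field that pvTimeOkB accepts parses to some minute count
lemma pv_timeok_parse (f : String) (h : pvTimeOkB f = true) : ∃ t, pvB_minutes? f = some t := by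
  unfold pvTimeOkB at h
  rcases hs : PySem.Str.split? f ":" with _ | ls
  · rw [hs] at h; simp at h
  · rw [hs] at h
    match ls, h with
    | [a, b], h =>
      simp only [Bool.and_eq_true, Option.isSome_iff_exists] at h
      obtain ⟨⟨x, hx⟩, ⟨y, hy⟩⟩ := h
      exact ⟨x * 60 + y, by simp [pvB_minutes?, hs, hx, hy]⟩

lemma pv_parts_shape (p : List String) (h : ¬ p.length < 4) :
    ∃ p0 p1 p2 p3 ps, p = p0 :: p1 :: p2 :: p3 :: ps := by
  rcases p with _ | ⟨p0, _ | ⟨p1, _ | ⟨p2, _ | ⟨p3, ps⟩⟩⟩⟩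
  · exfalso; simp at h
  · exfalso; simp at h
  · exfalso; simp at h
  · exfalso; simp at h
  · exact ⟨p0, p1, p2, p3, ps, rfl⟩

lemma pv_mel_ne_nil (p3 : String) (h1 : p3 ≠ "") (h2 : p3 ≠ "#")
    (h3 : pvDH p3.toList = false) : pvB_norm p3.toList ≠ [] := by
  refine pvB_norm_ne_nil _ (fun hc => h1 (String.toList_eq_nil_iff.mp hc)) (fun hc => h2 ?_) h3
  have : p3.toList = ("#" : String).toList := by rw [hc]; rfl
  exact String.toList_inj.mp this

lemma pvB_times_of_ok : ∀ (l : List String), l.all pvTimeOkB = true → ∃ ts, pvB_times? l = some ts := by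
  intro l
  induction l with
  | nil => intro _; exact ⟨[], rfl⟩
  | cons f rest ih =>
    intro h
    simp only [List.all_cons, Bool.and_eq_true] at h
    obtain ⟨t, ht⟩ := pv_timeok_parse f h.1
    obtain ⟨ts, hts⟩ := ih h.2
    exact ⟨t :: ts, by simp [pvB_times?, ht, hts]⟩

lemma pvB_entry_eq (key : List Char) (s : String) (b : Option (Int × String)) (h : pvEntryOk s) :
    pvB_entryStep key (some b) s =
      some (match pvMatch? key s with
            | none => b
            | some r => if b.isNone || decide ((b.getD (0, "")).1 < r.1) then some r else b) := by
  obtain ⟨hok, hbad⟩ := h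
  unfold pvInfoOkB at hok
  simp only [Bool.and_eq_true] at hok
  obtain ⟨hall, hmel⟩ := hok
  by_cases hp4 : (pvParts s).length < 4
  · simp only [pvB_entryStep, pvMatch?]
    obtain ⟨ts, hts⟩ := pvB_times_of_ok _ hall
    simp only [hts]
    rw [if_pos hp4, if_neg (by omega)]
  · obtain ⟨p0, p1, p2, p3, ps, hL⟩ := pv_parts_shape _ hp4
    simp only [pvB_entryStep, pvMatch?]
    rw [hL] at hall hmel hp4 hbad
    rw [hL]
    simp only [List.take_succ_cons, List.take_zero, List.all_cons, List.all_nil,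
      Bool.and_eq_true, Bool.and_true] at hall
    obtain ⟨ht0, ht1⟩ := hall
    obtain ⟨t0, hm0⟩ := pv_timeok_parse p0 ht0
    obtain ⟨t1, hm1⟩ := pv_timeok_parse p1 ht1
    have hmel' : p3 ≠ "" ∧ p3 ≠ "#" := by
      rcases Bool.or_eq_true_iff.mp hmel with hd | hd
      · exfalso; revert hd; simp
      · simp only [Bool.and_eq_true, Bool.not_eq_eq_eq_not, Bool.not_true, decide_eq_false_iff_not] at hd
        simpa using hd
    have hdh3 : pvDH p3.toList = false := by
      rcases Bool.and_eq_false_iff.mp hbad with hd | hd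
      · exfalso; revert hd; simp
      · simp only [List.getD_cons_succ, List.getD_cons_zero] at hd
        rcases Bool.or_eq_false_iff.mp hd with ⟨-, h2⟩
        exact h2
    have hne := pv_mel_ne_nil p3 hmel'.1 hmel'.2 hdh3
    simp only [List.take_succ_cons, List.take_zero,
      show pvB_times? [p0, p1] = some [t0, t1] from by simp [pvB_times?, hm0, hm1]]
    rw [if_neg hp4, if_pos (show 4 ≤ (p0 :: p1 :: p2 :: p3 :: ps).length by simp)]
    simp only [List.getD_cons_succ, List.getD_cons_zero, hm0, hm1, Option.getD_some]
    set mel := pvB_norm p3.toList with hmel2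
    set time := t1 - t0 with htime
    have hlen0 : (mel.length = 0) = False := by
      simp only [eq_iff_iff, iff_false]
      intro hc; exact hne (List.eq_nil_of_length_eq_zero hc)
    set big := pvStrMul mel (PySem.Int.floordiv time (PySem.List.len mel)) ++
        PySem.List.slice mel none (some (PySem.Int.mod time (PySem.List.len mel))) with hbig
    set small := PySem.List.slice mel none (some time) with hsmall
    have hplayed : (if PySem.List.len mel ≤ time then
        (if mel.length = 0 then none else some big) else some small) =
        some (if PySem.List.len mel ≤ time then big else small) := by
      split_ifs with h1 h2
      · rw [hlen0] at h2; exact absurd h2 (by simp)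
      · rfl
      · rfl
    rw [hplayed]
    set played := if PySem.List.len mel ≤ time then big else small with hpl
    cases hin : PySem.Chars.isIn key played with
    | false =>
      simp only [hin, Bool.false_and, Bool.false_eq_true, if_false]
    | true =>
      simp only [hin, Bool.true_and]
      cases hcond : (b.isNone || decide ((b.getD (0, "")).1 < time)) with
      | false =>
        have hnc : ¬ (b = none ∨ (b.getD (0, "")).1 < time) := by
          simp only [Bool.or_eq_false_iff, Option.isNone_eq_false_iff, decide_eq_false_iff_not] at hcond
          rcases hcond with ⟨h1, h2⟩
          rintro (hb | hb)
          · rw [hb] at h1; simp [Option.isSome] at h1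
          · exact h2 hb
        simp only [Bool.false_eq_true, if_false]
        simp [hnc]
      | true =>
        have hy : b = none ∨ (b.getD (0, "")).1 < time := by
          rcases Bool.or_eq_true_iff.mp hcond with h1 | h1
          · exact Or.inl (Option.isNone_iff_eq_none.mp h1)
          · exact Or.inr (of_decide_eq_true h1)
        simp [hy]

-- A's inner loop does nothing for indices past 3
lemma pvA_inner_stuck (key : List Char) (idx : Int) (n : Int) : ∀ (fuel : Nat) (a : Int)
    (st : Option (List (Int ⊕ String) × List (Int × Int × String))),
    (n - a).toNat ≤ fuel → 4 ≤ a →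
    (PySem.List.pyRange a n 1).foldl (pvA_innerStep key idx) st = st := by
  intro fuel
  induction fuel with
  | zero =>
    intro a st hf ha
    rw [PySem.List.pyRange_one_eq_nil (by omega)]
    rfl
  | succ k ih =>
    intro a st hf ha
    by_cases hab : n ≤ a
    · rw [PySem.List.pyRange_one_eq_nil hab]; rfl
    · rw [PySem.List.pyRange_one_cons (by omega), List.foldl_cons]
      have hstep : pvA_innerStep key idx st a = st := by
        cases st with
        | none => rfl
        | some pr =>
          simp only [pvA_innerStep]
          rw [if_neg (by omega), if_neg (by omega)]
      rw [hstep]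
      exact ih (a + 1) st (by omega) (by omega)

lemma pvA_step_time (key : List Char) (idx : Int) (info : List (Int ⊕ String))
    (ans : List (Int × Int × String)) (i : Nat) (hi : ((i : Nat) : Int) ≤ 1) (t : Int)
    (hp : pvA_parse? (pvIValStr (info.getD i (.inr ""))) = some t) :
    pvA_innerStep key idx (some (info, ans)) ((i : Nat) : Int) = some (info.set i (.inl t), ans) := by
  simp only [pvA_innerStep]
  rw [if_pos hi, PySem.List.pyGetD_natCast, hp]
  show some (PySem.List.pySetD info ((i : Nat) : Int) (.inl t), ans) = _
  rw [PySem.List.pySetD_natCast]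

lemma pvA_step_noop (key : List Char) (idx : Int)
    (st : Option (List (Int ⊕ String) × List (Int × Int × String))) (i : Int)
    (h1 : ¬ i ≤ 1) (h2 : i ≠ 3) : pvA_innerStep key idx st i = st := by
  cases st with
  | none => rfl
  | some pr =>
    obtain ⟨info, ans⟩ := pr
    simp only [pvA_innerStep]
    rw [if_neg h1, if_neg h2]

lemma pvA_step3 (key : List Char) (idx t0 t1 : Int) (p2 p3 : String) (ps : List String)
    (ans : List (Int × Int × String)) (mel : List Char)
    (hnorm : pvA_norm p3.toList = mel) (hne : mel ≠ []) :
    pvA_innerStep key idx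
        (some (.inl t0 :: .inl t1 :: .inr p2 :: .inr p3 :: ps.map .inr, ans)) (3 : Int)
      = some (.inl t0 :: .inl t1 :: .inr p2 :: .inr p3 :: ps.map .inr,
          if PySem.Chars.isIn key (if PySem.List.len mel ≤ t1 - t0 then
              pvStrMul mel (PySem.Int.floordiv (t1 - t0) (PySem.List.len mel)) ++
              PySem.List.slice mel none (some (PySem.Int.mod (t1 - t0) (PySem.List.len mel)))
            else PySem.List.slice mel none (some (t1 - t0)))
          then ans ++ [(idx, t1 - t0, p2)] else ans) := by
  simp only [pvA_innerStep]
  rw [if_neg (show ¬ ((3:Int) ≤ 1) by omega), if_pos trivial]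
  rw [PySem.List.pyGetD_ofNat', PySem.List.pyGetD_ofNat', PySem.List.pyGetD_ofNat',
    PySem.List.pyGetD_ofNat']
  simp only [List.getD_cons_succ, List.getD_cons_zero, pvIValInt, pvIValStr]
  rw [hnorm]
  rw [if_neg (fun hc => hne (List.eq_nil_of_length_eq_zero hc))]
  split_ifs <;> rfl

lemma pvA_entry_eq (key : List Char) (s : String) (idx : Int) (ans : List (Int × Int × String))
    (h : pvEntryOk s) :
    pvA_entry key (some ans) (idx, pvParts s) =
      some (ans ++ ((pvMatch? key s).map (fun r => (idx, r.1, r.2))).toList) := by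
  obtain ⟨hok, hbad⟩ := h
  unfold pvInfoOkB at hok
  simp only [Bool.and_eq_true] at hok
  obtain ⟨hall, hmel⟩ := hok
  simp only [pvA_entry, pvMatch?]
  by_cases hp4 : (pvParts s).length < 4
  · -- fewer than 4 fields: the time conversions of the existing fields run, nothing is appended
    rw [if_neg (by omega)]
    simp only [Option.map_none, Option.toList_none, List.append_nil]
    rcases hL : pvParts s with _ | ⟨p0, _ | ⟨p1, _ | ⟨p2, ps2⟩⟩⟩
    · simp [PySem.List.len_eq, PySem.List.pyRange_zero]
    · rw [hL] at hall
      simp only [List.take, List.all_cons, List.all_nil, Bool.and_true] at hall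
      obtain ⟨t0, hm0⟩ := pv_timeok_parse p0 hall
      simp only [PySem.List.len_eq, List.length_map, List.length_cons, List.length_nil, List.map_cons, List.map_nil]
      rw [show PySem.List.pyRange 0 ((0 + 1 : Nat) : Int) 1 = [((0:Nat):Int)] from by decide]
      rw [List.foldl_cons, List.foldl_nil,
        pvA_step_time key idx _ ans 0 (by norm_num) t0 (by simpa [pvIValStr] using hm0)]
    · rw [hL] at hall
      simp only [List.take, List.all_cons, List.all_nil, Bool.and_true, Bool.and_eq_true] at hall
      obtain ⟨t0, hm0⟩ := pv_timeok_parse p0 hall.1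
      obtain ⟨t1, hm1⟩ := pv_timeok_parse p1 hall.2
      simp only [PySem.List.len_eq, List.length_map, List.length_cons, List.length_nil, List.map_cons, List.map_nil]
      rw [show PySem.List.pyRange 0 ((0 + 1 + 1 : Nat) : Int) 1 = [((0:Nat):Int), ((1:Nat):Int)] from by decide]
      rw [List.foldl_cons, pvA_step_time key idx _ ans 0 (by norm_num) t0 (by simpa [pvIValStr] using hm0)]
      rw [List.foldl_cons, List.foldl_nil,
        pvA_step_time key idx _ ans 1 (by norm_num) t1 (by simpa [pvIValStr] using hm1)]
    · rw [hL] at hall hp4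
      have hps2 : ps2 = [] := by
        cases ps2 with
        | nil => rfl
        | cons a b => exfalso; simp at hp4; omega
      subst hps2
      simp only [List.take, List.all_cons, List.all_nil, Bool.and_true, Bool.and_eq_true] at hall
      obtain ⟨t0, hm0⟩ := pv_timeok_parse p0 hall.1
      obtain ⟨t1, hm1⟩ := pv_timeok_parse p1 hall.2
      simp only [PySem.List.len_eq, List.length_map, List.length_cons, List.length_nil, List.map_cons, List.map_nil]
      rw [show PySem.List.pyRange 0 ((0 + 1 + 1 + 1 : Nat) : Int) 1 = [((0:Nat):Int), ((1:Nat):Int), ((2:Nat):Int)] from by decide]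
      rw [List.foldl_cons, pvA_step_time key idx _ ans 0 (by norm_num) t0 (by simpa [pvIValStr] using hm0)]
      rw [List.foldl_cons, pvA_step_time key idx _ ans 1 (by norm_num) t1 (by simpa [pvIValStr] using hm1)]
      have hno : ∀ st : Option (List (Int ⊕ String) × List (Int × Int × String)),
          pvA_innerStep key idx st ((2 : Nat) : Int) = st := by
        intro st
        refine pvA_step_noop key idx st _ ?_ ?_ <;> norm_num
      rw [List.foldl_cons, List.foldl_nil, hno]
  · obtain ⟨p0, p1, p2, p3, ps, hL⟩ := pv_parts_shape _ hp4
    rw [if_pos (by omega)]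
    rw [hL] at hall hmel hp4 hbad
    rw [hL]
    simp only [List.take_succ_cons, List.take_zero, List.all_cons, List.all_nil,
      Bool.and_eq_true, Bool.and_true] at hall
    obtain ⟨ht0, ht1⟩ := hall
    obtain ⟨t0, hm0⟩ := pv_timeok_parse p0 ht0
    obtain ⟨t1, hm1⟩ := pv_timeok_parse p1 ht1
    have hmel' : p3 ≠ "" ∧ p3 ≠ "#" := by
      rcases Bool.or_eq_true_iff.mp hmel with hd | hd
      · exfalso; revert hd; simp
      · simp only [Bool.and_eq_true, Bool.not_eq_eq_eq_not, Bool.not_true, decide_eq_false_iff_not] at hd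
        simpa using hd
    have hbad3 : pvBadMel p3.toList = false := by
      rcases Bool.and_eq_false_iff.mp hbad with hd | hd
      · exfalso; revert hd; simp
      · simpa using hd
    have hdh3 : pvDH p3.toList = false := by
      rcases Bool.or_eq_false_iff.mp hbad3 with ⟨-, h2⟩; exact h2
    have hne := pv_mel_ne_nil p3 hmel'.1 hmel'.2 hdh3
    have hnorm : pvA_norm p3.toList = pvB_norm p3.toList := pv_norm_eq _ hbad3
    have hlen : PySem.List.len (((p0 :: p1 :: p2 :: p3 :: ps).map (Sum.inr (α := Int))))
        = ((4 + ps.length : Nat) : Int) := by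
      simp only [PySem.List.len_eq, List.length_map, List.length_cons]; push_cast; omega
    rw [hlen]
    rw [PySem.List.pyRange_one_append 0 4 ((4 + ps.length : Nat) : Int) (by omega) (by push_cast; omega)]
    rw [List.foldl_append]
    rw [show PySem.List.pyRange 0 4 1 = [((0:Nat):Int), ((1:Nat):Int), ((2:Nat):Int), (3 : Int)] from by decide]
    simp only [List.map_cons]
    rw [List.foldl_cons, pvA_step_time key idx _ ans 0 (by norm_num) t0 (by simpa [pvIValStr] using hm0)]
    rw [List.foldl_cons, pvA_step_time key idx _ ans 1 (by norm_num) t1 (by simpa [pvIValStr] using hm1)]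
    simp only [List.set_cons_zero, List.set_cons_succ]
    have hno : ∀ st : Option (List (Int ⊕ String) × List (Int × Int × String)),
        pvA_innerStep key idx st ((2 : Nat) : Int) = st := by
      intro st
      refine pvA_step_noop key idx st _ ?_ ?_ <;> norm_num
    rw [List.foldl_cons, hno]
    rw [List.foldl_cons, List.foldl_nil,
      pvA_step3 key idx t0 t1 p2 p3 ps ans (pvB_norm p3.toList) hnorm hne]
    rw [pvA_inner_stuck key idx _ ((((4 + ps.length : Nat) : Int)) - 4).toNat 4 _ le_rfl (by omega)]
    simp only [List.getD_cons_succ, List.getD_cons_zero, hm0, hm1, Option.getD_some]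
    cases hin : PySem.Chars.isIn key (if PySem.List.len (pvB_norm p3.toList) ≤ t1 - t0 then
        pvStrMul (pvB_norm p3.toList) (PySem.Int.floordiv (t1 - t0) (PySem.List.len (pvB_norm p3.toList))) ++
        PySem.List.slice (pvB_norm p3.toList) none (some (PySem.Int.mod (t1 - t0) (PySem.List.len (pvB_norm p3.toList))))
      else PySem.List.slice (pvB_norm p3.toList) none (some (t1 - t0))) with
    | false => simp [hin]
    | true => simp [hin]

lemma pvA_fold_eq (key : List Char) : ∀ (infos : List String) (idx : Int) (ans : List (Int × Int × String)),
    (∀ s ∈ infos, pvEntryOk s) →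
    (PySem.List.enumerate (infos.map pvParts) idx).foldl (pvA_entry key) (some ans) =
      some (ans ++ pvMatches key idx infos) := by
  intro infos
  induction infos with
  | nil => intro idx ans h; simp [PySem.List.enumerate_nil, pvMatches]
  | cons s rest ih =>
    intro idx ans h
    rw [List.map_cons, PySem.List.enumerate_cons, List.foldl_cons,
      pvA_entry_eq key s idx ans (h s (by simp)),
      ih (idx + 1) _ (fun x hx => h x (by simp [hx]))]
    simp [pvMatches, List.append_assoc]

lemma pvB_fold_eq (key : List Char) : ∀ (infos : List String) (idx : Int) (b : Option (Int × String)),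
    (∀ s ∈ infos, pvEntryOk s) →
    infos.foldl (pvB_entryStep key) (some b) =
      some ((pvMatches key idx infos).foldl pvUpd b) := by
  intro infos
  induction infos with
  | nil => intro idx b h; simp [pvMatches]
  | cons s rest ih =>
    intro idx b h
    rw [List.foldl_cons, pvB_entry_eq key s b (h s (by simp))]
    cases hm : pvMatch? key s with
    | none =>
      rw [ih (idx + 1) _ (fun x hx => h x (by simp [hx]))]
      simp [pvMatches, hm]
    | some r =>
      rw [ih (idx + 1) _ (fun x hx => h x (by simp [hx]))]
      simp only [pvMatches, hm, Option.map_some, Option.toList_some, List.singleton_append,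
        List.foldl_cons]
      rfl

lemma pvMatches_bounds (key : List Char) : ∀ (infos : List String) (idx : Int),
    (∀ x ∈ pvMatches key idx infos, idx ≤ x.1) ∧
    (pvMatches key idx infos).Pairwise (fun a b => a.1 < b.1) := by
  intro infos
  induction infos with
  | nil => intro idx; simp [pvMatches]
  | cons s rest ih =>
    intro idx
    obtain ⟨ihb, ihp⟩ := ih (idx + 1)
    constructor
    · intro x hx
      simp only [pvMatches, List.mem_append] at hx
      rcases hx with hx | hx
      · cases hm : pvMatch? key s with
        | none => rw [hm] at hx; simp at hx
        | some r => rw [hm] at hx; simp at hx; rw [hx]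
      · have := ihb x hx; omega
    · simp only [pvMatches]
      rw [List.pairwise_append]
      refine ⟨?_, ihp, ?_⟩
      · cases hm : pvMatch? key s with
        | none => simp
        | some r => simp
      · intro a ha b hb
        have hb' := ihb b hb
        cases hm : pvMatch? key s with
        | none => rw [hm] at ha; simp at ha
        | some r => rw [hm] at ha; simp at ha; rw [ha]; omega

-- non-empty match list gives a non-none running minimum
lemma pv_minfold_ne_none (ms : List (Int × Int × String)) (h : ms ≠ []) :
    ms.foldl pvMinStep none ≠ none := by
  intro hfold
  have hh := pv_sorted2_head ms
  rw [hfold, List.head?_eq_none_iff] at hh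
  have hperm := PySem.List.sorted2_perm ms (fun x => -x.2.1) (fun x => x.1) false
  rw [hh] at hperm
  exact h (List.Perm.nil_eq hperm).symm

-- ===== VERDICT =====
theorem solution_spec : Claim_equal_solution := by
  intro m infos hdom hpre
  -- decompose the precondition into per-entry facts
  unfold Pre_solution at hpre
  rw [Bool.and_eq_true, Bool.not_eq_eq_eq_not, Bool.not_true, Bool.or_eq_false_iff] at hpre
  obtain ⟨hall, hBm, hAny⟩ := hpre
  have hAny' : ∀ s ∈ infos, (decide (4 ≤ (pvParts s).length) && pvBadMel ((pvParts s).getD 3 "").toList) = false := by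
    intro s hs
    exact Bool.eq_false_iff.mpr (List.any_eq_false.mp hAny s hs)
  have hEnt : ∀ s ∈ infos, pvEntryOk s := by
    intro s hs
    exact ⟨List.all_eq_true.mp hall s hs, hAny' s hs⟩
  show solution m infos = solution_alt m infos
  simp only [solution, solution_alt]
  rw [pv_norm_eq m.toList hBm]
  rw [pvA_fold_eq (pvB_norm m.toList) infos 0 [] hEnt,
    pvB_fold_eq (pvB_norm m.toList) infos 0 none hEnt]
  simp only [List.nil_append]
  obtain ⟨-, hpair⟩ := pvMatches_bounds (pvB_norm m.toList) infos 0
  have hvb := pv_minfold_vs_best _ hpair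
  by_cases hnil : pvMatches (pvB_norm m.toList) 0 infos = []
  · rw [hnil]
    rfl
  · cases hfold : (pvMatches (pvB_norm m.toList) 0 infos).foldl pvMinStep none with
    | none => exact absurd hfold (pv_minfold_ne_none _ hnil)
    | some h =>
      rw [hfold] at hvb
      have hhead := pv_sorted2_head (pvMatches (pvB_norm m.toList) 0 infos)
      rw [hfold] at hhead
      rw [← hvb]
      simp only [Option.map_some]
      rw [if_neg (by simpa using hnil)]
      cases hs2 : PySem.List.sorted2 (pvMatches (pvB_norm m.toList) 0 infos)
          (fun x => -x.2.1) (fun x => x.1) with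
      | nil => rw [hs2] at hhead; simp at hhead
      | cons x t =>
        rw [hs2] at hhead
        simp only [List.head?_cons, Option.some.injEq] at hhead
        rw [hhead]
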